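-- pv_equiv track=rewrite | github.com/hrstnikolov/2023-oss-nlp | mermaid_utils.py | generate_mermaid_code
-- ===== SOURCE A (Python) =====
-- def generate_mermaid_code(input_text):
--     steps = input_text.splitlines()
--     processed_steps = []
--
--     for step in steps:
--         if step.startswith(" "):  # Sub-step
--             processed_steps.append(step.strip())
--         else:  # Main step
--             if processed_steps:
--                 processed_steps[-1] = {processed_steps[-1]: processed_steps[-1]}
--             processed_steps.append(step.strip())
--
--     mermaid_code = "```mermaid\n"
--     mermaid_code += "graph TD\n"
--
--     # Generate nodes
--     for i, step in enumerate(processed_steps, start=1):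
--         if isinstance(step, dict):  # Sub-step
--             for sub_step in step.values():
--                 mermaid_code += f"    {i}({sub_step})\n"
--         else:  # Main step
--             mermaid_code += f"    {i}({step})\n"
--
--     # Generate connections
--     mermaid_code += f"    {1}"
--     for i in range(2, len(processed_steps) + 1):
--         mermaid_code += f" --> {i}"
--     mermaid_code += "\n"
--
--     # Generate subgraph
--     if any(isinstance(step, dict) for step in processed_steps):
--         mermaid_code += "\n    subgraph preprocess\n"
--         for i, step in enumerate(processed_steps, start=1):
--             if isinstance(step, dict):
--                 for sub_step in step.values():
--                     mermaid_code += f"        {i}\n"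
--         mermaid_code += "    end\n"
--
--     mermaid_code += "```"
--     return mermaid_code
-- ===== SOURCE B (Python) =====
-- def generate_mermaid_code(input_text):
--     lines = input_text.splitlines()
--     texts = [line.strip() for line in lines]
--     # 1-based indices of elements followed by a main (non-indented) line
--     marked = [i for i, nxt in enumerate(lines[1:], 1) if not nxt.startswith(" ")]
--     parts = ["```mermaid\n", "graph TD\n"]
--     parts += [f"    {i}({t})\n" for i, t in enumerate(texts, 1)]
--     parts.append("    1" + "".join(f" --> {i}" for i in range(2, len(lines) + 1)) + "\n")
--     if marked:
--         parts.append("\n    subgraph preprocess\n")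
--         parts += [f"        {i}\n" for i in marked]
--         parts.append("    end\n")
--     parts.append("```")
--     return "".join(parts)
-- ===== Notes on version B (the rewrite author's own statement) =====
-- stated objective: simpler
-- what changed: B drops A's dict-sentinel mutation of the previous list element and instead computes the marked 1-based indices directly (a line is marked when the following line is non-indented), emitting the output as mapped string parts joined once instead of repeated string accumulation.
import Mathlib
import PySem

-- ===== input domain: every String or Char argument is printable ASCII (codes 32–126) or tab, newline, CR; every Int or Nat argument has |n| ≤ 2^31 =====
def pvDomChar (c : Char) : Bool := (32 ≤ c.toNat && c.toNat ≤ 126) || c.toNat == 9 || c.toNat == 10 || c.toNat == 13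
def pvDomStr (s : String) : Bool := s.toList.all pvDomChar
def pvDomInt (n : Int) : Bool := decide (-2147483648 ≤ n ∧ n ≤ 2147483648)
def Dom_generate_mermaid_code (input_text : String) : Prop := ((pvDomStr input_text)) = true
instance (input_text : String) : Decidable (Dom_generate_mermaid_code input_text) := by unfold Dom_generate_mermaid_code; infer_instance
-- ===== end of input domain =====

-- B replaces A's dict-sentinel trick by a precomputed list of marked indices and assembles the
-- output from mapped string parts joined once (objective: simpler).

-- ===== PORT A =====

-- A's processed_steps holds either a plain string (Sum.inl) or a dict {s: s} (Sum.inr).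
-- 'processed_steps[-1] = {processed_steps[-1]: processed_steps[-1]}' : wrap the last element.
def pvWrapLast : List (Sum String (PySem.Dict String String)) → List (Sum String (PySem.Dict String String))
  | [] => []
  | [e] =>
      [Sum.inr (match e with
        | Sum.inl s => PySem.Dict.mk [(s, s)]
        | Sum.inr d => d)]   -- the .inr case is unreachable (A never wraps a dict)
  | e :: rest => e :: pvWrapLast rest

def generate_mermaid_code (input_text : String) : String :=
  let steps := PySem.Str.splitlines input_text
  let processed_steps : List (Sum String (PySem.Dict String String)) :=
    steps.foldl (fun acc step =>
      if PySem.Str.startswith step " " then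
        acc ++ [Sum.inl (PySem.Str.strip step)]
      else
        (if acc.isEmpty then acc else pvWrapLast acc) ++ [Sum.inl (PySem.Str.strip step)]) []
  let code1 := "```mermaid\n" ++ "graph TD\n"
  -- Generate nodes
  let code2 := (PySem.List.enumerate processed_steps 1).foldl (fun code p =>
      match p.2 with
      | Sum.inr d => (PySem.Dict.values d).foldl
          (fun code sub => code ++ "    " ++ PySem.Int.toStr p.1 ++ "(" ++ sub ++ ")\n") code
      | Sum.inl s => code ++ "    " ++ PySem.Int.toStr p.1 ++ "(" ++ s ++ ")\n") code1
  -- Generate connections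
  let code3 := code2 ++ "    " ++ PySem.Int.toStr 1
  let code4 := (PySem.List.pyRange 2 ((processed_steps.length : Int) + 1) 1).foldl
      (fun code i => code ++ " --> " ++ PySem.Int.toStr i) code3
  let code5 := code4 ++ "\n"
  -- Generate subgraph
  let code6 :=
    if processed_steps.any (fun s => match s with | Sum.inr _ => true | Sum.inl _ => false) then
      let c := code5 ++ "\n    subgraph preprocess\n"
      let c := (PySem.List.enumerate processed_steps 1).foldl (fun code p =>
          match p.2 with
          | Sum.inr d => (PySem.Dict.values d).foldl (fun code _ => code ++ "        " ++ PySem.Int.toStr p.1 ++ "\n") code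
          | Sum.inl _ => code) c
      c ++ "    end\n"
    else code5
  code6 ++ "```"

-- ===== PORT B =====
def generate_mermaid_code_alt (input_text : String) : String :=
  let lines := PySem.Str.splitlines input_text
  let texts := lines.map PySem.Str.strip
  -- 1-based indices of elements followed by a main (non-indented) line
  let marked := ((PySem.List.enumerate (PySem.List.slice lines (some 1) none) 1).filter
      (fun p => !(PySem.Str.startswith p.2 " "))).map (·.1)
  let parts := ["```mermaid\n", "graph TD\n"]
      ++ (PySem.List.enumerate texts 1).map (fun p => "    " ++ PySem.Int.toStr p.1 ++ "(" ++ p.2 ++ ")\n")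
      ++ ["    1" ++ PySem.Str.join "" ((PySem.List.pyRange 2 ((lines.length : Int) + 1) 1).map
            (fun i => " --> " ++ PySem.Int.toStr i)) ++ "\n"]
      ++ (if marked.isEmpty then []
          else ["\n    subgraph preprocess\n"]
            ++ marked.map (fun i => "        " ++ PySem.Int.toStr i ++ "\n")
            ++ ["    end\n"])
      ++ ["```"]
  PySem.Str.join "" parts

-- ===== PRECONDITION & SPEC =====
def Spec_generate_mermaid_code (input_text : String) (out : String) : Prop := out = generate_mermaid_code_alt input_text
instance (input_text : String) (out : String) : Decidable (Spec_generate_mermaid_code input_text out) := by unfold Spec_generate_mermaid_code; infer_instance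

-- ===== CLAIM (what is proved, stated in full; the proofs are below) =====
def Claim_equal_generate_mermaid_code : Prop := ∀ (input_text : String), Dom_generate_mermaid_code input_text → Spec_generate_mermaid_code input_text (generate_mermaid_code input_text)


-- ===== LEMMAS AND PROOFS =====

-- join with empty separator: structural lemmas
theorem pvJoin_nil : PySem.Str.join "" ([] : List String) = "" := by
  apply String.toList_inj.mp
  simp [PySem.Str.join, PySem.Chars.join, List.intercalate]

theorem pvJoin_cons (x : String) (xs : List String) :
    PySem.Str.join "" (x :: xs) = x ++ PySem.Str.join "" xs := by
  apply String.toList_inj.mp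
  simp only [PySem.Str.join, PySem.Chars.join, List.intercalate, String.toList_append,
    String.toList_ofList, List.map_cons]
  cases xs <;> simp

theorem pvJoin_append (xs ys : List String) :
    PySem.Str.join "" (xs ++ ys) = PySem.Str.join "" xs ++ PySem.Str.join "" ys := by
  induction xs with
  | nil => simp [pvJoin_nil]
  | cons x xs ih => simp [pvJoin_cons, ih, String.append_assoc]

-- the flag: the next line exists and is a main (non-indented) step
def pvHeadMain (xs : List String) : Bool :=
  match xs with
  | [] => false
  | y :: _ => !(PySem.Str.startswith y " ")

-- closed form of A's processed_steps
def pvAnnotate : List String → List (Sum String (PySem.Dict String String))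
  | [] => []
  | x :: xs =>
      (if pvHeadMain xs then
        Sum.inr (PySem.Dict.mk [(PySem.Str.strip x, PySem.Str.strip x)])
      else Sum.inl (PySem.Str.strip x)) :: pvAnnotate xs

theorem pvWrapLast_append (zs : List (Sum String (PySem.Dict String String)))
    (e : Sum String (PySem.Dict String String)) :
    pvWrapLast (zs ++ [e]) = zs ++
      [Sum.inr (match e with
        | Sum.inl s => PySem.Dict.mk [(s, s)]
        | Sum.inr d => d)] := by
  induction zs with
  | nil => rfl
  | cons z zs ih =>
    cases zs with
    | nil => cases e <;> rfl
    | cons w ws => simpa [pvWrapLast] using ih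

theorem pvProcess_eq (xs : List String)
    (acc : List (Sum String (PySem.Dict String String))) :
    xs.foldl (fun acc step =>
      if PySem.Str.startswith step " " then
        acc ++ [Sum.inl (PySem.Str.strip step)]
      else
        (if acc.isEmpty then acc else pvWrapLast acc) ++ [Sum.inl (PySem.Str.strip step)]) acc
    = (if pvHeadMain xs then pvWrapLast acc else acc) ++ pvAnnotate xs := by
  induction xs generalizing acc with
  | nil => simp [pvHeadMain, pvAnnotate]
  | cons y ys ih =>
    rw [List.foldl_cons, ih]
    have hguard : (if acc.isEmpty then acc else pvWrapLast acc) = pvWrapLast acc := by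
      cases acc <;> rfl
    have hcons : pvHeadMain (y :: ys) = !(PySem.Str.startswith y " ") := rfl
    have hann : pvAnnotate (y :: ys)
        = (if pvHeadMain ys then
            Sum.inr (PySem.Dict.mk [(PySem.Str.strip y, PySem.Str.strip y)])
          else Sum.inl (PySem.Str.strip y)) :: pvAnnotate ys := rfl
    rw [hann, hcons]
    by_cases hy : PySem.Str.startswith y " " = true <;>
      by_cases hm : pvHeadMain ys = true <;>
        simp only [hy, hguard, hm, Bool.not_true, Bool.not_false, if_true,
          pvWrapLast_append, List.append_assoc, List.cons_append, List.nil_append] <;>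
        simp [pvWrapLast_append, List.append_assoc]

theorem pvAnnotate_length (ls : List String) : (pvAnnotate ls).length = ls.length := by
  induction ls with
  | nil => rfl
  | cons x xs ih => simp [pvAnnotate, ih]

-- 1-based indices of the dict elements of pvAnnotate
def pvDictIdx : List (Sum String (PySem.Dict String String)) → Int → List Int
  | [], _ => []
  | e :: rest, k =>
      (match e with | Sum.inr _ => [k] | Sum.inl _ => []) ++ pvDictIdx rest (k + 1)

theorem pvAnyDict (l : List (Sum String (PySem.Dict String String))) (k : Int) :
    (l.any fun s => match s with | Sum.inr _ => true | Sum.inl _ => false)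
      = !(pvDictIdx l k).isEmpty := by
  induction l generalizing k with
  | nil => rfl
  | cons e rest ih => cases e <;> simp [pvDictIdx, ih (k+1)]

theorem pvDictIdx_annotate (ls : List String) (k : Int) :
    pvDictIdx (pvAnnotate ls) k
      = ((PySem.List.enumerate ls.tail k).filter
          (fun p => !(PySem.Str.startswith p.2 " "))).map (·.1) := by
  induction ls generalizing k with
  | nil => rfl
  | cons x xs ih =>
    cases xs with
    | nil => simp [pvAnnotate, pvHeadMain, pvDictIdx]
    | cons y ys =>
      have hrest := ih (k := k + 1)
      simp only [List.tail_cons] at hrest ⊢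
      have hann : pvAnnotate (x :: y :: ys)
          = (if pvHeadMain (y :: ys) then
              Sum.inr (PySem.Dict.mk [(PySem.Str.strip x, PySem.Str.strip x)])
            else Sum.inl (PySem.Str.strip x)) :: pvAnnotate (y :: ys) := rfl
      cases hm : PySem.Str.startswith y " " with
      | true =>
        have hpv : pvHeadMain (y :: ys) = false := by
          show (!PySem.Str.startswith y " ") = false
          rw [hm]; rfl
        rw [hann, hpv]
        simp only [Bool.false_eq_true, if_false, pvDictIdx, List.nil_append,
          PySem.List.enumerate_cons, List.filter_cons, hm, Bool.not_true, hrest]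
      | false =>
        have hpv : pvHeadMain (y :: ys) = true := by
          show (!PySem.Str.startswith y " ") = true
          rw [hm]; rfl
        rw [hann, hpv]
        simp only [if_true, pvDictIdx, List.singleton_append,
          PySem.List.enumerate_cons, List.filter_cons, hm, Bool.not_false,
          List.map_cons, hrest]

theorem pvNodes_fold (ls : List String) (k : Int) (code : String) :
    (PySem.List.enumerate (pvAnnotate ls) k).foldl (fun code p =>
      match p.2 with
      | Sum.inr d => (PySem.Dict.values d).foldl
          (fun code sub => code ++ "    " ++ PySem.Int.toStr p.1 ++ "(" ++ sub ++ ")\n") code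
      | Sum.inl s => code ++ "    " ++ PySem.Int.toStr p.1 ++ "(" ++ s ++ ")\n") code
    = code ++ PySem.Str.join ""
        ((PySem.List.enumerate (ls.map PySem.Str.strip) k).map
          (fun p => "    " ++ PySem.Int.toStr p.1 ++ "(" ++ p.2 ++ ")\n")) := by
  induction ls generalizing k code with
  | nil => simp [pvAnnotate, pvJoin_nil]
  | cons x xs ih =>
    by_cases hm : pvHeadMain xs = true <;>
      simp only [pvAnnotate, hm, if_true, if_false, reduceIte, PySem.List.enumerate_cons,
        List.foldl_cons, PySem.Dict.values_mk, List.foldl_nil] <;>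
      rw [ih] <;> simp [pvJoin_cons, String.append_assoc]

theorem pvConn_fold (r : List Int) (code : String) :
    r.foldl (fun code i => code ++ " --> " ++ PySem.Int.toStr i) code
    = code ++ PySem.Str.join "" (r.map (fun i => " --> " ++ PySem.Int.toStr i)) := by
  induction r generalizing code with
  | nil => simp [pvJoin_nil]
  | cons i r ih =>
    simp only [List.foldl_cons, List.map_cons, pvJoin_cons]
    rw [ih]
    simp [String.append_assoc]

theorem pvSub_fold (ls : List String) (k : Int) (code : String) :
    (PySem.List.enumerate (pvAnnotate ls) k).foldl (fun code p =>
      match p.2 with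
      | Sum.inr d => (PySem.Dict.values d).foldl
          (fun code _ => code ++ "        " ++ PySem.Int.toStr p.1 ++ "\n") code
      | Sum.inl _ => code) code
    = code ++ PySem.Str.join ""
        ((pvDictIdx (pvAnnotate ls) k).map (fun i => "        " ++ PySem.Int.toStr i ++ "\n")) := by
  induction ls generalizing k code with
  | nil => simp [pvAnnotate, pvDictIdx, pvJoin_nil]
  | cons x xs ih =>
    by_cases hm : pvHeadMain xs = true <;>
      simp only [pvAnnotate, hm, if_true, if_false, reduceIte, PySem.List.enumerate_cons,
        List.foldl_cons, PySem.Dict.values_mk, List.foldl_nil,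
        pvDictIdx, List.singleton_append, List.nil_append] <;>
      rw [ih] <;> simp [pvJoin_cons, String.append_assoc]

-- ===== VERDICT (by name: the statement is the Claim_ definition above) =====
theorem generate_mermaid_code_spec : Claim_equal_generate_mermaid_code := by
  intro input_text _
  show generate_mermaid_code input_text = generate_mermaid_code_alt input_text
  simp only [generate_mermaid_code, generate_mermaid_code_alt]
  rw [pvProcess_eq]
  simp only [pvWrapLast, ite_self, List.nil_append, PySem.List.slice_from_one]
  rw [pvNodes_fold, pvConn_fold, pvSub_fold, pvAnnotate_length,
    pvAnyDict (k := 1), pvDictIdx_annotate]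
  set M := (List.map (fun x => x.1)
    (List.filter (fun p => !PySem.Str.startswith p.2 " ")
      (PySem.List.enumerate (PySem.Str.splitlines input_text).tail 1))) with hM
  rw [show ("    1" : String) = "    " ++ PySem.Int.toStr 1 from by decide]
  cases hMe : M.isEmpty <;>
    simp [hMe, pvJoin_append, pvJoin_cons, pvJoin_nil, String.append_assoc] <;>
    (apply String.toList_inj.mp; simp)
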